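-- pv_equiv track=rewrite | github.com/Fjscah/ExonDataSimulation | filefunc.py | find_indexs
-- ===== SOURCE A (Python) =====
-- def find_indexs(string, char):
--     l, s, x, y, i, t = [], [], 0, 0, 0, False
--     for i, n in enumerate(string):
--         if n != char and not t:
--             x = i
--             t = True
--         elif n == char and t:
--             y = i
--             l.append((x, y))
--             t = False
--     if t:
--         l.append((x, i+1))
--     if l:
--         for n in l:
--             s.append(string[n[0]:n[1]])
--     return l, s
-- ===== SOURCE B (Python) =====
-- def find_indexs(string, char):
--     # skip/scan: skip characters equal to char, then scan one whole non-char run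
--     l = []
--     n = len(string)
--     i = 0
--     while i < n:
--         if string[i] == char:
--             i += 1
--         else:
--             j = i + 1
--             while j < n and string[j] != char:
--                 j += 1
--             l.append((i, j))
--             i = j
--     return l, [string[a:b] for a, b in l]
-- ===== Notes on version B (the rewrite author's own statement) =====
-- stated objective: alternative
-- what changed: Replaced A's single enumerate pass carrying a boolean in/out-of-run flag plus a trailing-run fixup by a skip/scan decomposition: an outer loop skips characters equal to char, an inner loop scans one whole non-char run, and (start,end) is emitted per run with no flag and no post-loop fixup.
import Mathlib
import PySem

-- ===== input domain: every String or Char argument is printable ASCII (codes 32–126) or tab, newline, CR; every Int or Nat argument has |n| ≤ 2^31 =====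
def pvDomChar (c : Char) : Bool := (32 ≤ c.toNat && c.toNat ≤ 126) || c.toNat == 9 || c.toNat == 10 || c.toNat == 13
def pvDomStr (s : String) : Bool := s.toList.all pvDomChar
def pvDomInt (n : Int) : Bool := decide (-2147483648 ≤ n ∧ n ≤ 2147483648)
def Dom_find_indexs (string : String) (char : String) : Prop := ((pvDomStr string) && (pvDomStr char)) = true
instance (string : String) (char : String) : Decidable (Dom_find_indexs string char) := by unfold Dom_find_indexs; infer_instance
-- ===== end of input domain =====

-- B replaces A's single pass with a boolean in/out-of-run flag and trailing-run fixup by a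
-- skip/scan decomposition (skip chars equal to char, scan one whole run with an inner loop);
-- objective: alternative decomposition, same linear cost.

-- ===== PORT A =====
-- A's loop body: state (l, x, y, i, t); each iteration stores the current index in i.
def stepA (cl : List Char) (st : (List (Int × Int)) × Int × Int × Int × Bool)
    (p : Int × Char) : (List (Int × Int)) × Int × Int × Int × Bool :=
  match st with
  | (l, x, y, _i, t) =>
    if [p.2] ≠ cl ∧ ¬t then (l, p.1, y, p.1, true)
    else if [p.2] = cl ∧ t then (l ++ [(x, p.1)], x, p.1, p.1, false)
    else (l, x, y, p.1, t)

def find_indexs (string : String) (char : String) : (List (Int × Int)) × List String :=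
  let cs := string.toList
  let cl := char.toList
  let st := (PySem.List.enumerate cs).foldl (stepA cl) ([], 0, 0, 0, false)
  let l := if st.2.2.2.2 then st.1 ++ [(st.2.1, st.2.2.2.1 + 1)] else st.1
  let s := if l ≠ [] then l.map (fun n => String.ofList (PySem.List.slice cs (some n.1) (some n.2))) else []
  (l, s)

-- ===== PORT B =====
-- the inner `while j < len and string[j] != char: j += 1` loop of Source B
def altScan (cs cl : List Char) (j : Nat) : Nat :=
  if h : j < cs.length then
    if [cs[j]] ≠ cl then altScan cs cl (j + 1) else j
  else j
termination_by cs.length - j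

-- termination fact for altRuns (the scan never moves backwards)
theorem altScan_ge (cs cl : List Char) (j : Nat) : j ≤ altScan cs cl j := by
  unfold altScan
  split
  · split
    · have := altScan_ge cs cl (j + 1); omega
    · exact le_refl j
  · exact le_refl j
termination_by cs.length - j

-- Source B's outer `while i < n` loop (skip or emit one whole run)
def altRuns (cs cl : List Char) (i : Nat) : List (Int × Int) :=
  if h : i < cs.length then
    if [cs[i]] = cl then altRuns cs cl (i + 1)
    else
      let j := altScan cs cl (i + 1)
      ((i : Int), (j : Int)) :: altRuns cs cl j
  else []
termination_by cs.length - i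
decreasing_by
  · omega
  · have := altScan_ge cs cl (i + 1); omega

def find_indexs_alt (string : String) (char : String) : (List (Int × Int)) × List String :=
  let cs := string.toList
  let cl := char.toList
  let l := altRuns cs cl 0
  (l, l.map (fun p => String.ofList (PySem.List.slice cs (some p.1) (some p.2))))

-- ===== PRECONDITION & SPEC =====
def Spec_find_indexs (string : String) (char : String) (out : (List (Int × Int)) × List String) : Prop := out = find_indexs_alt string char
instance (string : String) (char : String) (out : (List (Int × Int)) × List String) : Decidable (Spec_find_indexs string char out) := by unfold Spec_find_indexs; infer_instance

-- ===== CLAIM (what is proved, stated in full; the proofs are below) =====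
def Claim_equal_find_indexs : Prop := ∀ (string : String) (char : String), Dom_find_indexs string char → Spec_find_indexs string char (find_indexs string char)

-- ===== LEMMAS AND PROOFS =====

theorem altScan_stop (cs cl : List Char) (j : Nat) (h : ¬ j < cs.length) :
    altScan cs cl j = j := by
  unfold altScan; simp [h]

theorem altScan_step (cs cl : List Char) (j : Nat) (h : j < cs.length)
    (hne : [cs[j]] ≠ cl) : altScan cs cl j = altScan cs cl (j + 1) := by
  conv_lhs => rw [altScan]
  simp [h, hne]

theorem altScan_eq_self (cs cl : List Char) (j : Nat) (h : j < cs.length)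
    (heq : [cs[j]] = cl) : altScan cs cl j = j := by
  conv_lhs => rw [altScan]
  simp [h, heq]

theorem altRuns_stop (cs cl : List Char) (i : Nat) (h : ¬ i < cs.length) :
    altRuns cs cl i = [] := by
  unfold altRuns; simp [h]

theorem altRuns_skip (cs cl : List Char) (i : Nat) (h : i < cs.length)
    (heq : [cs[i]] = cl) : altRuns cs cl i = altRuns cs cl (i + 1) := by
  conv_lhs => rw [altRuns]
  simp [h, heq]

theorem altRuns_run (cs cl : List Char) (i : Nat) (h : i < cs.length)
    (hne : [cs[i]] ≠ cl) :
    altRuns cs cl i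
      = ((i : Int), ((altScan cs cl (i + 1) : Nat) : Int))
          :: altRuns cs cl (altScan cs cl (i + 1)) := by
  conv_lhs => rw [altRuns]
  simp [h, hne]

-- the main loop invariant: A's fold (plus the trailing-run fixup) over the suffix of cs
-- starting at index i produces exactly what B's runs recursion produces from i
theorem loop_inv (cs cl tail : List Char) (i : Nat) (l : List (Int × Int))
    (x y i0 : Int) (t : Bool)
    (hi : cs.drop i = tail) (ht : t = true → i0 = (i : Int) - 1) :
    (let st := (PySem.List.enumerate tail (i : Int)).foldl (stepA cl) (l, x, y, i0, t)
     if st.2.2.2.2 then st.1 ++ [(st.2.1, st.2.2.2.1 + 1)] else st.1)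
      = l ++ (if t then
                ((x, ((altScan cs cl i : Nat) : Int)) :: altRuns cs cl (altScan cs cl i))
              else altRuns cs cl i) := by
  induction tail generalizing i l x y i0 t with
  | nil =>
    have hge : ¬ i < cs.length := by
      have := List.drop_eq_nil_iff.mp hi; omega
    cases t with
    | false =>
      simp [PySem.List.enumerate_nil, altRuns_stop cs cl i hge]
    | true =>
      have hi0 := ht rfl
      simp [PySem.List.enumerate_nil, altScan_stop cs cl i hge,
            altRuns_stop cs cl i hge, hi0]
  | cons c rest ih =>
    have hlt : i < cs.length := by
      by_contra hcon
      rw [List.drop_eq_nil_iff.mpr (by omega)] at hi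
      simp at hi
    have hc : cs[i] = c := by
      have h0 : (cs.drop i)[0]? = some c := by rw [hi]; rfl
      rw [List.getElem?_drop] at h0
      have h1 : i + 0 < cs.length ∧ cs[i+0]'(by omega) = c := by
        have := List.getElem?_eq_some_iff.mp h0
        obtain ⟨hh, he⟩ := this
        exact ⟨hh, he⟩
      simpa using h1.2
    have hrest : cs.drop (i + 1) = rest := by
      have h1 : (cs.drop i).drop 1 = rest := by rw [hi]; rfl
      rw [List.drop_drop] at h1
      exact h1
    rw [PySem.List.enumerate_cons]
    by_cases hd : [c] = cl
    · cases t with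
      | false =>
        have hstep : stepA cl (l, x, y, i0, false) ((i : Int), c)
            = (l, x, y, (i : Int), false) := by
          simp [stepA, hd]
        rw [List.foldl_cons, hstep]
        have := ih (i + 1) l x y (i : Int) false hrest (by simp)
        push_cast at this ⊢
        rw [this, altRuns_skip cs cl i hlt (by rw [hc]; exact hd)]
      | true =>
        have hstep : stepA cl (l, x, y, i0, true) ((i : Int), c)
            = (l ++ [(x, (i : Int))], x, (i : Int), (i : Int), false) := by
          simp [stepA, hd]
        rw [List.foldl_cons, hstep]
        have := ih (i + 1) (l ++ [(x, (i : Int))]) x (i : Int) (i : Int) false hrest (by simp)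
        push_cast at this ⊢
        rw [this, altScan_eq_self cs cl i hlt (by rw [hc]; exact hd),
            altRuns_skip cs cl i hlt (by rw [hc]; exact hd)]
        simp
    · cases t with
      | false =>
        have hstep : stepA cl (l, x, y, i0, false) ((i : Int), c)
            = (l, (i : Int), y, (i : Int), true) := by
          simp [stepA, hd]
        rw [List.foldl_cons, hstep]
        have := ih (i + 1) l (i : Int) y (i : Int) true hrest (by intro _; push_cast; ring)
        push_cast at this ⊢
        rw [this, altRuns_run cs cl i hlt (by rw [hc]; exact hd)]
        simp
      | true =>
        have hstep : stepA cl (l, x, y, i0, true) ((i : Int), c)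
            = (l, x, y, (i : Int), true) := by
          simp [stepA, hd]
        rw [List.foldl_cons, hstep]
        have := ih (i + 1) l x y (i : Int) true hrest (by intro _; push_cast; ring)
        push_cast at this ⊢
        rw [this, altScan_step cs cl i hlt (by rw [hc]; exact hd)]
        simp

-- ===== VERDICT (by name: the statement is the Claim_ definition above) =====
theorem find_indexs_spec : Claim_equal_find_indexs := by
  intro string char _
  unfold Spec_find_indexs find_indexs find_indexs_alt
  have hmain := loop_inv string.toList char.toList string.toList 0 [] 0 0 0 false
    (by simp) (by simp)
  simp only at hmain
  rw [show ((0 : Nat) : Int) = (0 : Int) by rfl] at hmain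
  simp only [if_neg (by simp : ¬ (false = true))] at hmain
  simp only []
  rw [hmain]
  simp only [List.nil_append]
  cases h : altRuns string.toList char.toList 0 with
  | nil => simp
  | cons a as => simp
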